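-- pv_equiv track=rewrite | github.com/curtislb/ProjectEuler | py/common/arrays.py | cumulative_partial_sums
-- ===== SOURCE A (Python) =====
-- import collections
-- from typing import Deque, Dict, Iterable, List, Mapping, Optional, Sequence
--
-- def cumulative_partial_sums(nums: Sequence[int], limit: int) -> Sequence[int]:
--     """Finds the partial cumulative sums of a sequence of integers.
--
--     Args:
--         nums: An arbitrary integer sequence.
--         limit: The maximum number of terms to include in each partial sum.
--
--     Returns:
--         An integer sequence with length ``len(nums)``, where each term is the
--         sum of up to the previous ``limit`` terms in ``nums``, including the
--         term at the current index.
--     """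
--
--     sums: List[int] = []
--     terms: Deque[int] = collections.deque()
--
--     total = 0
--     for num in nums:
--         total += num
--         terms.append(num)
--
--         if len(terms) > limit:
--             total -= terms.popleft()
--
--         sums.append(total)
--
--     return sums
-- ===== SOURCE B (Python) =====
-- def cumulative_partial_sums(nums, limit):
--     prefix = [0]
--     for x in nums:
--         prefix.append(prefix[-1] + x)
--     return [prefix[i + 1] - prefix[min(i + 1, max(0, i + 1 - limit))]
--             for i in range(len(nums))]
-- ===== Notes on version B (the rewrite author's own statement) =====
-- stated objective: alternative
-- what changed: Replaces the running deque+total sliding window with a precomputed prefix-sum table; each output is a difference of two prefix sums at clamped indices.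
import Mathlib
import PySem

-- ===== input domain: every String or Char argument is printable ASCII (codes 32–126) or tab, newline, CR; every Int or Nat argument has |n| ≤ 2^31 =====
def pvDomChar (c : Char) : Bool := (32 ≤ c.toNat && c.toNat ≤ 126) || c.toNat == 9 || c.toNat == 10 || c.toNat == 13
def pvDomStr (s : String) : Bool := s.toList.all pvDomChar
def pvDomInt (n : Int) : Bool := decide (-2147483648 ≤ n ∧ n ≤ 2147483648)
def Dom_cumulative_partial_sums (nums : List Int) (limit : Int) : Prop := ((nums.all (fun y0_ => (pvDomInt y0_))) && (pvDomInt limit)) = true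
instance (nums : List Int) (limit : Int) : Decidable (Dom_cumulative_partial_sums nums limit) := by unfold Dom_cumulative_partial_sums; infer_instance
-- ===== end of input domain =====

-- B replaces A's running deque+total sliding window by a prefix-sum table and
-- reads each answer off as a difference of two prefix sums (alternative
-- decomposition, same cost). Both are total; return values proved equal.

-- ===== PORT A =====
-- loop state: (sums, terms, total); the deque is a list (append right, popleft = head/tail)
def cpsStepA (limit : Int) (st : List Int × List Int × Int) (num : Int) : List Int × List Int × Int :=
  let total := st.2.2 + num
  let terms := st.2.1 ++ [num]
  if limit < (terms.length : Int) then
    (st.1 ++ [total - terms.headI], terms.tail, total - terms.headI)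
  else
    (st.1 ++ [total], terms, total)

def cumulative_partial_sums (nums : List Int) (limit : Int) : List Int :=
  (nums.foldl (cpsStepA limit) ([], [], 0)).1

-- ===== PORT B =====
-- prefix[-1] is List.getLastD (list always nonempty); the two indices are
-- nonnegative and in range, so .toNat indexing is exact here.
def cumulative_partial_sums_alt (nums : List Int) (limit : Int) : List Int :=
  let pre := nums.foldl (fun p x => p ++ [p.getLastD 0 + x]) [0]
  (PySem.List.pyRange 0 (nums.length : Int) 1).map (fun i =>
    pre.getD (i + 1).toNat 0 - pre.getD (min (i + 1) (max 0 (i + 1 - limit))).toNat 0)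

-- ===== PRECONDITION & SPEC =====
def Spec_cumulative_partial_sums (nums : List Int) (limit : Int) (out : List Int) : Prop := out = cumulative_partial_sums_alt nums limit
instance (nums : List Int) (limit : Int) (out : List Int) : Decidable (Spec_cumulative_partial_sums nums limit out) := by unfold Spec_cumulative_partial_sums; infer_instance

-- ===== CLAIM (what is proved, stated in full; the proofs are below) =====
def Claim_equal_cumulative_partial_sums : Prop := ∀ (nums : List Int) (limit : Int), Dom_cumulative_partial_sums nums limit → Spec_cumulative_partial_sums nums limit (cumulative_partial_sums nums limit)

-- ===== LEMMAS AND PROOFS =====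

-- lower index of the window over a prefix of length k
def loN (k : Nat) (limit : Int) : Nat := min k ((k : Int) - limit).toNat

-- the deque's contents after processing the prefix p
def window (p : List Int) (limit : Int) : List Int := p.drop (loN p.length limit)

def refAux (limit : Int) (p l : List Int) : List Int :=
  match l with
  | [] => []
  | x :: xs => (window (p ++ [x]) limit).sum :: refAux limit (p ++ [x]) xs

def pscan (s : Int) : List Int → List Int
  | [] => []
  | x :: xs => (s + x) :: pscan (s + x) xs

theorem sum_tail_eq (l : List Int) (h : l ≠ []) : l.tail.sum = l.sum - l.headI := by
  cases l with
  | nil => simp at h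
  | cons a t => simp [List.headI]

theorem window_snoc_pop (p : List Int) (x : Int) (limit : Int)
    (h : limit ≤ (p.length : Int)) :
    window (p ++ [x]) limit = (window p limit ++ [x]).tail := by
  by_cases hl : limit ≤ 0
  · have h1 : loN p.length limit = p.length := by unfold loN; omega
    have h2 : loN (p.length + 1) limit = p.length + 1 := by unfold loN; omega
    simp [window, h1, h2]
  · rw [not_le] at hl
    set LN := limit.toNat with hLN
    have hLN1 : 1 ≤ LN := by omega
    have hLNk : LN ≤ p.length := by omega
    have h1 : loN p.length limit = p.length - LN := by unfold loN; omega
    have h2 : loN (p.length + 1) limit = p.length + 1 - LN := by unfold loN; omega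
    have hwne : p.drop (p.length - LN) ≠ [] := by
      intro hc
      have := congrArg List.length hc
      simp at this; omega
    have hle : p.length + 1 - LN ≤ p.length := by omega
    simp only [window, List.length_append, List.length_cons, List.length_nil, h2, h1]
    rw [List.drop_append_of_le_length hle]
    cases hd : p.drop (p.length - LN) with
    | nil => exact absurd hd hwne
    | cons a t =>
        have h' : (p.drop (p.length - LN)).tail = p.drop (p.length - LN + 1) := by
          simp [List.tail_drop]
        rw [hd] at h'
        have hidx : p.length + 1 - LN = p.length - LN + 1 := by omega
        simp [hidx, ← h']

theorem window_snoc_keep (p : List Int) (x : Int) (limit : Int)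
    (h : (p.length : Int) < limit) :
    window (p ++ [x]) limit = p ++ [x] ∧ window p limit = p := by
  have h1 : loN p.length limit = 0 := by unfold loN; omega
  have h2 : loN (p.length + 1) limit = 0 := by unfold loN; omega
  constructor
  · simp [window, h2]
  · simp [window, h1]

theorem window_len_cond (p : List Int) (limit : Int) :
    (limit < ((window p limit).length : Int) + 1) ↔ limit ≤ (p.length : Int) := by
  simp only [window, List.length_drop]
  unfold loN
  omega

theorem step_window (limit : Int) (acc p : List Int) (x : Int) :
    cpsStepA limit (acc, window p limit, (window p limit).sum) x
    = (acc ++ [(window (p ++ [x]) limit).sum], window (p ++ [x]) limit,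
       (window (p ++ [x]) limit).sum) := by
  unfold cpsStepA
  simp only [List.length_append, List.length_cons, List.length_nil]
  by_cases h : limit ≤ (p.length : Int)
  · have hcond : limit < ((window p limit).length : Int) + 1 := (window_len_cond p limit).2 h
    have hW := window_snoc_pop p x limit h
    have hs := sum_tail_eq (window p limit ++ [x]) (by simp)
    rw [if_pos (by push_cast; omega)]
    simp [hW, hs]
  · rw [not_le] at h
    obtain ⟨hW, hP⟩ := window_snoc_keep p x limit h
    have hlen : (window p limit).length = p.length := by rw [hP]
    rw [if_neg (by rw [hlen]; push_cast; omega)]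
    simp [hW, hP]

theorem foldA_inv (limit : Int) :
    ∀ (l p acc : List Int),
      (l.foldl (cpsStepA limit) (acc, window p limit, (window p limit).sum)).1
      = acc ++ refAux limit p l := by
  intro l
  induction l with
  | nil => intro p acc; simp [refAux]
  | cons x xs ih =>
      intro p acc
      simp only [List.foldl_cons, step_window, refAux]
      rw [ih (p ++ [x]) (acc ++ [(window (p ++ [x]) limit).sum])]
      simp

theorem A_eq_refAux (nums : List Int) (limit : Int) :
    cumulative_partial_sums nums limit = refAux limit [] nums := by
  have h0 : window ([] : List Int) limit = [] := by simp [window]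
  have := foldA_inv limit nums [] []
  rw [h0] at this
  simpa [cumulative_partial_sums] using this

theorem refAux_eq_map (limit : Int) :
    ∀ (l p : List Int),
      refAux limit p l
      = (List.range l.length).map (fun j => (window (p ++ l.take (j + 1)) limit).sum) := by
  intro l
  induction l with
  | nil => intro p; simp [refAux]
  | cons x xs ih =>
      intro p
      simp only [refAux, List.length_cons, List.range_succ_eq_map, List.map_cons,
        List.map_map]
      refine congrArg₂ List.cons (by simp) ?_
      rw [ih (p ++ [x])]
      apply List.map_congr_left
      intro j _
      simp [Function.comp, List.append_assoc]

theorem fold_pscan :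
    ∀ (l p : List Int), p ≠ [] →
      l.foldl (fun p x => p ++ [p.getLastD 0 + x]) p = p ++ pscan (p.getLastD 0) l := by
  intro l
  induction l with
  | nil => intro p _; simp [pscan]
  | cons x xs ih =>
      intro p hp
      simp only [List.foldl_cons]
      rw [ih (p ++ [p.getLastD 0 + x]) (by simp)]
      simp [pscan]

theorem pscan_getD :
    ∀ (l : List Int) (s : Int) (k : Nat), k < l.length →
      (pscan s l).getD k 0 = s + (l.take (k + 1)).sum := by
  intro l
  induction l with
  | nil => intro s k h; simp at h
  | cons x xs ih =>
      intro s k h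
      cases k with
      | zero => simp [pscan]
      | succ k =>
          simp only [pscan, List.getD_cons_succ, List.take_succ_cons, List.sum_cons]
          rw [ih (s + x) k (by simpa using h)]
          ring

theorem prefix_getD (nums : List Int) (k : Nat) (hk : k ≤ nums.length) :
    (nums.foldl (fun p x => p ++ [p.getLastD 0 + x]) [0]).getD k 0
    = (nums.take k).sum := by
  rw [fold_pscan nums [0] (by simp)]
  simp only [show ([0] : List Int).getLastD 0 = 0 from rfl]
  cases k with
  | zero => simp
  | succ k =>
      simp only [List.cons_append, List.nil_append, List.getD_cons_succ]
      rw [pscan_getD nums 0 k (by omega)]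
      simp

theorem sum_drop_eq (l : List Int) (m : Nat) :
    (l.drop m).sum = l.sum - (l.take m).sum := by
  have h := List.take_append_drop m l
  have : (l.take m).sum + (l.drop m).sum = l.sum := by
    conv_rhs => rw [← h]
    simp
  omega

theorem B_eq_map (nums : List Int) (limit : Int) :
    cumulative_partial_sums_alt nums limit
    = (List.range nums.length).map
        (fun j => (window (nums.take (j + 1)) limit).sum) := by
  unfold cumulative_partial_sums_alt
  rw [PySem.List.pyRange_zero_nat, List.map_map]
  apply List.map_congr_left
  intro j hj
  have hjn : j < nums.length := List.mem_range.mp hj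
  simp only [Function.comp_apply]
  have h1 : ((j : Int) + 1).toNat = j + 1 := by omega
  have h2 : (min ((j : Int) + 1) (max 0 ((j : Int) + 1 - limit))).toNat
      = loN (j + 1) limit := by unfold loN; omega
  rw [h1, h2]
  have hlo : loN (j + 1) limit ≤ j + 1 := by unfold loN; omega
  rw [prefix_getD nums (j + 1) (by omega),
      prefix_getD nums (loN (j + 1) limit) (by omega)]
  have hlen : (nums.take (j + 1)).length = j + 1 := by
    simp; omega
  have htt : (nums.take (j + 1)).take (loN (j + 1) limit) = nums.take (loN (j + 1) limit) := by
    rw [List.take_take]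
    congr 1
    omega
  simp only [window, hlen]
  rw [sum_drop_eq _ _, htt]

-- ===== VERDICT (by name: the statement is the Claim_ definition above) =====
theorem cumulative_partial_sums_spec : Claim_equal_cumulative_partial_sums := by
  intro nums limit _
  unfold Spec_cumulative_partial_sums
  rw [A_eq_refAux, refAux_eq_map, B_eq_map]
  simp
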